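-- pv_equiv track=rewrite | github.com/awm-miller/istari | src/storage/negative_news_store.py | person_ids_fingerprint
-- ===== SOURCE A (Python) =====
-- from typing import Any
--
-- def person_ids_fingerprint(person_ids: Any) -> str:
--     values: set[int] = set()
--     for value in person_ids or []:
--         try:
--             values.add(int(value))
--         except (TypeError, ValueError):
--             continue
--     if not values:
--         return ""
--     return ",".join(str(value) for value in sorted(values))
-- ===== SOURCE B (Python) =====
-- def _merge_unique(xs, ys):
--     # merge two strictly increasing lists, emitting each common value once
--     out = []
--     i = j = 0
--     while i < len(xs) and j < len(ys):
--         x, y = xs[i], ys[j]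
--         if x < y:
--             out.append(x); i += 1
--         elif y < x:
--             out.append(y); j += 1
--         else:
--             out.append(x); i += 1; j += 1
--     out.extend(xs[i:])
--     out.extend(ys[j:])
--     return out
--
-- def _msort_unique(l):
--     # sort l and remove duplicates by divide and conquer
--     if len(l) <= 1:
--         return l
--     mid = len(l) // 2
--     return _merge_unique(_msort_unique(l[:mid]), _msort_unique(l[mid:]))
--
-- def person_ids_fingerprint(person_ids):
--     vals = []
--     for value in person_ids or []:
--         try:
--             vals.append(int(value))
--         except (TypeError, ValueError):
--             continue
--     return ",".join(str(v) for v in _msort_unique(vals))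
-- ===== Notes on version B (the rewrite author's own statement) =====
-- stated objective: alternative
-- what changed: No set and no library sort: the parsed ids are sorted and deduplicated by a hand-written divide-and-conquer merge sort whose merge step emits each value common to both halves exactly once, so deduplication happens inside the merge rather than via a hash set before sorting.
import Mathlib
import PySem

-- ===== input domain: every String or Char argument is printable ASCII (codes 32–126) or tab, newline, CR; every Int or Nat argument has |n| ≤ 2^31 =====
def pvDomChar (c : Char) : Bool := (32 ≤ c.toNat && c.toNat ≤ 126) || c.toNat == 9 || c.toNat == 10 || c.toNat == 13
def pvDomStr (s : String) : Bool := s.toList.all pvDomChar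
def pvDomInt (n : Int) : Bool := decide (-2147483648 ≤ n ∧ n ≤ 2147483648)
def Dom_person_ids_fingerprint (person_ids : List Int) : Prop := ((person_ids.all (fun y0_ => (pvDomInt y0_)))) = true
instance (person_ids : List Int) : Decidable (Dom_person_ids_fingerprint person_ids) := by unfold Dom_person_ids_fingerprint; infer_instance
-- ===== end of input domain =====

-- B replaces A's set-dedup-then-sort by a hand-written merge sort whose merge emits common values once (alternative algorithm).


-- ===== PORT A =====
-- A: build a set of int(value) (on Int inputs int() is the identity and never raises),
-- return "" if empty, else join str over sorted(values) (no key: exact on a Set).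
def person_ids_fingerprint (person_ids : List Int) : String :=
  let values : PySem.Set Int := person_ids.foldl (fun s v => PySem.Set.add s v) PySem.Set.empty
  if values = [] then ""
  else PySem.Str.join "," ((PySem.List.sorted values (fun x => x) false).map PySem.Int.toStr)

-- ===== PORT B =====
-- _merge_unique of Source B: merge two strictly increasing lists, common values once
def pvMergeUnique : List Int → List Int → List Int
  | [], ys => ys
  | x :: xs, [] => x :: xs
  | x :: xs, y :: ys =>
    if x < y then x :: pvMergeUnique xs (y :: ys)
    else if y < x then y :: pvMergeUnique (x :: xs) ys
    else x :: pvMergeUnique xs ys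
termination_by a b => a.length + b.length

-- _msort_unique of Source B: divide and conquer, l[:mid] / l[mid:] with mid = len // 2
def pvMsortUnique (l : List Int) : List Int :=
  if l.length ≤ 1 then l
  else
    let mid := l.length / 2
    pvMergeUnique (pvMsortUnique (l.take mid)) (pvMsortUnique (l.drop mid))
termination_by l.length
decreasing_by
  · simp only [List.length_take]; omega
  · simp only [List.length_drop]; omega

-- Source B's vals loop over Int inputs is the identity (int(v) = v, never raising)
def person_ids_fingerprint_alt (person_ids : List Int) : String :=
  PySem.Str.join "," ((pvMsortUnique person_ids).map PySem.Int.toStr)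

-- ===== PRECONDITION & SPEC =====
def Spec_person_ids_fingerprint (person_ids : List Int) (out : String) : Prop := out = person_ids_fingerprint_alt person_ids
instance (person_ids : List Int) (out : String) : Decidable (Spec_person_ids_fingerprint person_ids out) := by unfold Spec_person_ids_fingerprint; infer_instance

-- ===== CLAIM (what is proved, stated in full; the proofs are below) =====
def Claim_equal_person_ids_fingerprint : Prop := ∀ (person_ids : List Int), Dom_person_ids_fingerprint person_ids → Spec_person_ids_fingerprint person_ids (person_ids_fingerprint person_ids)

-- ===== LEMMAS AND PROOFS =====

lemma mem_pvMergeUnique (a : Int) (xs ys : List Int) :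
    a ∈ pvMergeUnique xs ys ↔ a ∈ xs ∨ a ∈ ys := by
  induction xs, ys using pvMergeUnique.induct with
  | case1 ys => simp [pvMergeUnique]
  | case2 x xs => simp [pvMergeUnique]
  | case3 x xs y ys h ih =>
    simp only [pvMergeUnique, if_pos h, List.mem_cons, ih]; tauto
  | case4 x xs y ys h1 h2 ih =>
    simp only [pvMergeUnique, if_neg h1, if_pos h2, List.mem_cons, ih]; tauto
  | case5 x xs y ys h1 h2 ih =>
    have hxy : x = y := le_antisymm (not_lt.mp h2) (not_lt.mp h1)
    subst hxy
    simp only [pvMergeUnique, if_neg h1, List.mem_cons, ih]; tauto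

lemma pairwise_pvMergeUnique (xs ys : List Int)
    (hx : xs.Pairwise (· < ·)) (hy : ys.Pairwise (· < ·)) :
    (pvMergeUnique xs ys).Pairwise (· < ·) := by
  induction xs, ys using pvMergeUnique.induct with
  | case1 ys => simpa [pvMergeUnique] using hy
  | case2 x xs => simpa [pvMergeUnique] using hx
  | case3 x xs y ys h ih =>
    rcases List.pairwise_cons.mp hx with ⟨hxall, hx'⟩
    simp only [pvMergeUnique, if_pos h]
    refine List.pairwise_cons.mpr ⟨?_, ih hx' hy⟩
    intro a ha
    rcases (mem_pvMergeUnique a xs (y :: ys)).mp ha with ha | ha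
    · exact hxall a ha
    · rcases List.mem_cons.mp ha with rfl | ha
      · exact h
      · exact lt_trans h ((List.pairwise_cons.mp hy).1 a ha)
  | case4 x xs y ys h1 h2 ih =>
    rcases List.pairwise_cons.mp hy with ⟨hyall, hy'⟩
    simp only [pvMergeUnique, if_neg h1, if_pos h2]
    refine List.pairwise_cons.mpr ⟨?_, ih hx hy'⟩
    intro a ha
    rcases (mem_pvMergeUnique a (x :: xs) ys).mp ha with ha | ha
    · rcases List.mem_cons.mp ha with rfl | ha
      · exact h2
      · exact lt_trans h2 ((List.pairwise_cons.mp hx).1 a ha)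
    · exact hyall a ha
  | case5 x xs y ys h1 h2 ih =>
    have hxy : x = y := le_antisymm (not_lt.mp h2) (not_lt.mp h1)
    subst hxy
    rcases List.pairwise_cons.mp hx with ⟨hxall, hx'⟩
    rcases List.pairwise_cons.mp hy with ⟨hyall, hy'⟩
    simp only [pvMergeUnique, if_neg h1]
    refine List.pairwise_cons.mpr ⟨?_, ih hx' hy'⟩
    intro a ha
    rcases (mem_pvMergeUnique a xs ys).mp ha with ha | ha
    · exact hxall a ha
    · exact hyall a ha

lemma pvMsortUnique_spec (l : List Int) :
    (pvMsortUnique l).Pairwise (· < ·) ∧ (∀ a, a ∈ pvMsortUnique l ↔ a ∈ l) := by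
  induction l using pvMsortUnique.induct with
  | case1 l h =>
    rw [pvMsortUnique, if_pos h]
    match l, h with
    | [], _ => simp
    | [x], _ => simp
  | case2 l h mid ih1 ih2 =>
    rw [pvMsortUnique, if_neg h]
    refine ⟨pairwise_pvMergeUnique _ _ ih1.1 ih2.1, ?_⟩
    intro a
    rw [mem_pvMergeUnique, ih1.2, ih2.2]
    conv_rhs => rw [← List.take_append_drop mid l]
    rw [List.mem_append]

lemma pvMsortUnique_eq_sorted_set (xs : List Int) :
    pvMsortUnique xs = PySem.List.sorted (PySem.Set.ofList xs) (fun x => x) false := by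
  obtain ⟨hpair, hmem⟩ := pvMsortUnique_spec xs
  symm
  apply PySem.List.sorted_eq_of_perm_of_pairwise_lt
  · have hnd : (pvMsortUnique xs).Nodup := hpair.imp (fun h => ne_of_lt h)
    rw [List.perm_ext_iff_of_nodup hnd (PySem.Set.nodup_ofList xs)]
    intro a
    rw [hmem a, PySem.Set.mem_ofList]
  · exact hpair

lemma pvOfList_eq_nil_iff (xs : List Int) : PySem.Set.ofList xs = [] ↔ xs = [] := by
  constructor
  · intro h
    cases xs with
    | nil => rfl
    | cons x t =>
      have : x ∈ PySem.Set.ofList (x :: t) :=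
        (PySem.Set.mem_ofList (x :: t) x).mpr List.mem_cons_self
      simp [h] at this
  · rintro rfl; rfl

-- ===== VERDICT (by name: the statement is the Claim_ definition above) =====
theorem person_ids_fingerprint_spec : Claim_equal_person_ids_fingerprint := by
  intro xs _
  unfold Spec_person_ids_fingerprint person_ids_fingerprint person_ids_fingerprint_alt
  have hset : xs.foldl (fun s v => PySem.Set.add s v) PySem.Set.empty = PySem.Set.ofList xs := rfl
  rw [hset]
  by_cases h : xs = []
  · subst h
    rw [pvMsortUnique]
    rfl
  · rw [if_neg ((not_iff_not.mpr (pvOfList_eq_nil_iff xs)).mpr h), pvMsortUnique_eq_sorted_set]
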